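-- pv_equiv track=rewrite | github.com/yuls12/Algorithm-Programmers | Level 2/피로도/Solution.py | clear_dungeoun
-- ===== SOURCE A (Python) =====
-- def clear_dungeoun(k, dungeons):
--     result = 0
--     for dungeon in dungeons:
--         need, consum = dungeon
--         if k < need:
--             return result
--         k -= consum
--         result += 1
--     return result
-- ===== SOURCE B (Python) =====
-- def clear_dungeoun(k, dungeons):
--     # Prefix-sum decomposition: dungeon i is clearable iff k - (fatigue consumed
--     # before it) >= its need; count the leading run where this holds.
--     prefix = [0]
--     for d in dungeons:
--         prefix.append(prefix[-1] + d[1])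
--     count = 0
--     for d, p in zip(dungeons, prefix):
--         if k - p < d[0]:
--             break
--         count += 1
--     return count
-- ===== Notes on version B (the rewrite author's own statement) =====
-- stated objective: alternative
-- what changed: Replaces the stateful running-fatigue loop with early return by an exclusive prefix-sum table of consumption plus a single scan counting the leading run of dungeons whose need fits k minus the fatigue consumed before them.
-- outside the precondition, e.g. on clear_dungeoun(0, [[5, 1], [7]]): A returns 0, B raises IndexError
import Mathlib
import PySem

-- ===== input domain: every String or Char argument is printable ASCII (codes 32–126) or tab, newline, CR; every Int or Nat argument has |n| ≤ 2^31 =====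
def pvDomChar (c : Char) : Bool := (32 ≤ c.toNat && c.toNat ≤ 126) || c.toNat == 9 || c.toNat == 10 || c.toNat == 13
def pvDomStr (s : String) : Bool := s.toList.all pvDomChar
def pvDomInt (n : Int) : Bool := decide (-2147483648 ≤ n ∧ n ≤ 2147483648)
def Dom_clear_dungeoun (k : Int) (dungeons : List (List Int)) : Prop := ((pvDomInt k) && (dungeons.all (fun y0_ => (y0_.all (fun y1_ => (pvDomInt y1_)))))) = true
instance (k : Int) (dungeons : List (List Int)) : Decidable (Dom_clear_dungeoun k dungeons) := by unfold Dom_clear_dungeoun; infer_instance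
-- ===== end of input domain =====

-- B replaces A's stateful running-fatigue loop by an exclusive prefix-sum table
-- of consumption plus one scan counting the leading run of clearable dungeons
-- (alternative decomposition, same O(n) cost).


-- ===== PORT A =====
-- A's loop: unpack [need, consum]; early return when k < need, else consume and count.
def clearLoopA (k : Int) (result : Int) : List (List Int) → Int
  | [] => result
  | d :: rest =>
    match d with
    | [need, consum] =>
      if k < need then result else clearLoopA (k - consum) (result + 1) rest
    | _ => result  -- Python raises ValueError here (unpacking); excluded by Pre_

def clear_dungeoun (k : Int) (dungeons : List (List Int)) : Int :=
  clearLoopA k 0 dungeons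

-- ===== PORT B =====
-- prefix.append(prefix[-1] + d[1]) loop
def buildPrefix (pre : List Int) : List (List Int) → List Int
  | [] => pre
  | d :: rest => buildPrefix (pre ++ [PySem.List.pyGetD pre (-1) 0 + PySem.List.pyGetD d 1 0]) rest

-- for d, p in zip(...): break on failure, else count += 1
def countLoopB (k : Int) (count : Int) : List (List Int × Int) → Int
  | [] => count
  | (d, p) :: rest =>
    if k - p < PySem.List.pyGetD d 0 0 then count else countLoopB k (count + 1) rest

def clear_dungeoun_alt (k : Int) (dungeons : List (List Int)) : Int :=
  countLoopB k 0 (dungeons.zip (buildPrefix [0] dungeons))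

-- ===== PRECONDITION & SPEC =====
-- Pre_ excludes dungeons with an inner list whose length ≠ 2: there A's unpacking
-- raises ValueError (or, when an early return precedes the malformed entry, A returns
-- while B's eager prefix pass raises IndexError).
def Pre_clear_dungeoun (k : Int) (dungeons : List (List Int)) : Prop :=
  ∀ d ∈ dungeons, d.length = 2
instance (k : Int) (dungeons : List (List Int)) : Decidable (Pre_clear_dungeoun k dungeons) := by unfold Pre_clear_dungeoun; infer_instance

def pvWitness_clear_dungeoun : Int × List (List Int) := (10, [[5, 3], [6, 2], [20, 1]])

def Spec_clear_dungeoun (k : Int) (dungeons : List (List Int)) (out : Int) : Prop := out = clear_dungeoun_alt k dungeons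
instance (k : Int) (dungeons : List (List Int)) (out : Int) : Decidable (Spec_clear_dungeoun k dungeons out) := by unfold Spec_clear_dungeoun; infer_instance

-- ===== CLAIM (what is proved, stated in full; the proofs are below) =====
def Claim_equal_clear_dungeoun : Prop := ∀ (k : Int) (dungeons : List (List Int)), Dom_clear_dungeoun k dungeons → Pre_clear_dungeoun k dungeons → Spec_clear_dungeoun k dungeons (clear_dungeoun k dungeons)

-- ===== LEMMAS AND PROOFS =====

-- the exclusive prefix sums contributed by ds, starting from running total b
def prefList (b : Int) : List (List Int) → List Int
  | [] => []
  | d :: rest => (b + PySem.List.pyGetD d 1 0) :: prefList (b + PySem.List.pyGetD d 1 0) rest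

theorem buildPrefix_eq (ds : List (List Int)) : ∀ (pre : List Int) (x : Int),
    buildPrefix (pre ++ [x]) ds = pre ++ x :: prefList x ds := by
  induction ds with
  | nil => intro pre x; simp [buildPrefix, prefList]
  | cons d rest ih =>
    intro pre x
    rw [buildPrefix]
    have hlast : PySem.List.pyGetD (pre ++ [x]) (-1) 0 = x :=
      PySem.List.pyGetD_neg_one_append_singleton pre x 0
    rw [hlast, ih]
    simp [prefList]

theorem loop_eq (ds : List (List Int)) : ∀ (k b result : Int),
    (∀ d ∈ ds, d.length = 2) →
    clearLoopA (k - b) result ds = countLoopB k result (ds.zip (b :: prefList b ds)) := by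
  induction ds with
  | nil => intro k b result _; simp [clearLoopA, countLoopB]
  | cons d rest ih =>
    intro k b result hpre
    have hd : d.length = 2 := hpre d (by simp)
    match d, hd with
    | [need, consum], _ =>
      rw [prefList]
      simp only [List.zip_cons_cons, clearLoopA, countLoopB]
      have h0 : PySem.List.pyGetD [need, consum] 0 0 = need := by
        simp [PySem.List.pyGetD, PySem.List.pyGet?, PySem.List.pyIdx?]
      have h1 : PySem.List.pyGetD [need, consum] 1 0 = consum := by
        simp [PySem.List.pyGetD, PySem.List.pyGet?, PySem.List.pyIdx?]
      rw [h0, h1]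
      by_cases hlt : k - b < need
      · simp [hlt]
      · simp only [hlt, if_false]
        have := ih k (b + consum) (result + 1) (fun x hx => hpre x (by simp [hx]))
        have harith : k - b - consum = k - (b + consum) := by ring
        rw [harith, this]

-- ===== VERDICT (by name: the statement is the Claim_ definition above) =====
theorem clear_dungeoun_spec : Claim_equal_clear_dungeoun := by
  intro k ds _ hpre
  unfold Spec_clear_dungeoun clear_dungeoun clear_dungeoun_alt
  have hb : buildPrefix [0] ds = 0 :: prefList 0 ds := by
    have := buildPrefix_eq ds [] 0
    simpa using this
  rw [hb]
  have := loop_eq ds k 0 0 hpre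
  simpa using this
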